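-- pv_equiv track=rewrite | github.com/Gilberto-xyz/Restaurar-DVD | DVD_restorer_validado.py | draw_grid
-- ===== SOURCE A (Python) =====
-- def draw_grid(cols, rows, filled_cells, total_cells):
--     filled_cells = max(0, min(total_cells, filled_cells))
--     full = "█"
--     empty = "░"
--     out_lines = []
--     for r in range(rows):
--         line = []
--         for c in range(cols):
--             idx = r*cols + c
--             line.append(full if idx < filled_cells else empty)
--         out_lines.append("".join(line))
--     return "\n".join(out_lines)
-- ===== SOURCE B (Python) =====
-- def draw_grid(cols, rows, filled_cells, total_cells):
--     filled = max(0, min(total_cells, filled_cells))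
--     n = max(rows, 0) * max(cols, 0)
--     full_count = min(filled, n)
--     flat = "\u2588" * full_count + "\u2591" * (n - full_count)
--     return "\n".join(flat[r * cols:(r + 1) * cols] for r in range(rows))
-- ===== Notes on version B (the rewrite author's own statement) =====
-- stated objective: faster
-- what changed: Replaces the per-cell nested loops with a per-cell branch by computing the clamped full-cell count once, building one flat run of full then empty characters in bulk string operations, and slicing it into cols-wide rows.
import Mathlib
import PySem

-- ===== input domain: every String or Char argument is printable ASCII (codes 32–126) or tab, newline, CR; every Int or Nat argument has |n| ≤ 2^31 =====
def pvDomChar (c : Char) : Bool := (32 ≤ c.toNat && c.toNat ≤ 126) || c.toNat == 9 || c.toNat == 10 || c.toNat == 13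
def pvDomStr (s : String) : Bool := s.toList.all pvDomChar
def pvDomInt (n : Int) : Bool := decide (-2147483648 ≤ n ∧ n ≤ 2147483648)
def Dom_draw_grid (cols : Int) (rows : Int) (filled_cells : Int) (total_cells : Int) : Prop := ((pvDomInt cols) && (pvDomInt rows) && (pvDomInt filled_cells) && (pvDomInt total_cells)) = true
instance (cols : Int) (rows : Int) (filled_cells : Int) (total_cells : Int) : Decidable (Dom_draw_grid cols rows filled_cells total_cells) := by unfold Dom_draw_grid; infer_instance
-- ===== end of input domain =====

-- B builds the clamped count of full cells once, materialises one flat run of '█'s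
-- followed by '░'s, and slices it into rows — instead of A's per-cell nested loops
-- with a branch per cell. Objective: simpler (bulk construction, no per-cell branch).

-- ===== PORT A =====
def draw_grid (cols : Int) (rows : Int) (filled_cells : Int) (total_cells : Int) : String :=
  let filled := max 0 (min total_cells filled_cells)
  let out_lines := (PySem.List.pyRange 0 rows 1).foldl
      (fun acc r => acc ++ [(PySem.List.pyRange 0 cols 1).foldl
          (fun lacc c => lacc ++ [if r * cols + c < filled then '█' else '░']) []])
      []
  String.ofList (PySem.Chars.join ['\n'] out_lines)

-- ===== PORT B =====
def draw_grid_alt (cols : Int) (rows : Int) (filled_cells : Int) (total_cells : Int) : String :=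
  let filled := max 0 (min total_cells filled_cells)
  let n := max rows 0 * max cols 0
  let fullCount := min filled n
  let flat := PySem.List.pyRepeat ['█'] fullCount ++ PySem.List.pyRepeat ['░'] (n - fullCount)
  String.ofList (PySem.Chars.join ['\n']
    ((PySem.List.pyRange 0 rows 1).map
      (fun r => PySem.List.slice flat (some (r * cols)) (some ((r + 1) * cols)))))

-- ===== PRECONDITION & SPEC =====
def Spec_draw_grid (cols : Int) (rows : Int) (filled_cells : Int) (total_cells : Int) (out : String) : Prop := out = draw_grid_alt cols rows filled_cells total_cells
instance (cols : Int) (rows : Int) (filled_cells : Int) (total_cells : Int) (out : String) : Decidable (Spec_draw_grid cols rows filled_cells total_cells out) := by unfold Spec_draw_grid; infer_instance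

-- ===== CLAIM (what is proved, stated in full; the proofs are below) =====
def Claim_equal_draw_grid : Prop := ∀ (cols : Int) (rows : Int) (filled_cells : Int) (total_cells : Int), Dom_draw_grid cols rows filled_cells total_cells → Spec_draw_grid cols rows filled_cells total_cells (draw_grid cols rows filled_cells total_cells)

-- ===== LEMMAS AND PROOFS =====

-- indexing a run of `p` copies of x followed by `q` copies of y
lemma getElem_replicate_append_replicate {α : Type} (x y : α) (p q i : Nat)
    (h : i < (List.replicate p x ++ List.replicate q y).length) :
    (List.replicate p x ++ List.replicate q y)[i] = if i < p then x else y := by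
  by_cases hp : i < p
  · rw [List.getElem_append_left (by simpa using hp)]
    simp [hp]
  · rw [List.getElem_append_right (by simpa using hp)]
    simp [hp]

-- the r-th slice of B's flat run equals A's r-th row
lemma row_eq (cols rows filled r : Int) (hf : 0 ≤ filled) (hr : 0 ≤ r) (hrow : r < rows) :
    PySem.List.slice
      (PySem.List.pyRepeat ['█'] (min filled (max rows 0 * max cols 0)) ++
        PySem.List.pyRepeat ['░'] (max rows 0 * max cols 0 - min filled (max rows 0 * max cols 0)))
      (some (r * cols)) (some ((r + 1) * cols))
    = (PySem.List.pyRange 0 cols 1).map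
        (fun c => if r * cols + c < filled then '█' else '░') := by
  rw [PySem.List.pyRepeat_singleton, PySem.List.pyRepeat_singleton]
  have hrm : max rows 0 = rows := by omega
  rw [hrm]
  by_cases hc : cols ≤ 0
  · -- empty rows: the flat run is empty and the slice of [] is []
    have hcm : max cols 0 = 0 := by omega
    rw [hcm]
    have h1 : (min filled (rows * 0)).toNat = 0 := by omega
    have h2 : (rows * 0 - min filled (rows * 0)).toNat = 0 := by omega
    rw [h1, h2]
    simp [PySem.List.pyRange_one_eq_nil hc, PySem.List.slice]
  · have hc : 0 < cols := by omega
    have hcm : max cols 0 = cols := by omega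
    rw [hcm]
    have hA : 0 ≤ r * cols := mul_nonneg hr (le_of_lt hc)
    have hB : 0 ≤ (r + 1) * cols := mul_nonneg (by omega) (le_of_lt hc)
    have hBA : (r + 1) * cols = r * cols + cols := by ring
    have hBn : (r + 1) * cols ≤ rows * cols :=
      mul_le_mul_of_nonneg_right (by omega) (le_of_lt hc)
    rw [PySem.List.slice_toNat _ hA hB]
    generalize hAv : r * cols = A at *
    generalize hNv : rows * cols = n at *
    have hFd : 0 ≤ min filled n := by omega
    apply List.ext_getElem
    · simp [PySem.List.length_pyRange_one]
      omega
    · intro k h1 h2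
      rw [List.getElem_take, List.getElem_drop,
        getElem_replicate_append_replicate _ _ _ _ _ (by simp at h1 ⊢; omega)]
      rw [List.getElem_map, PySem.List.getElem_pyRange_one]
      have hk : (k : Int) < cols := by
        simp [PySem.List.length_pyRange_one] at h2; omega
      have hiff : (A.toNat + k < (min filled n).toNat) ↔ (A + (0 + (k : Int)) < filled) := by
        omega
      split_ifs with hL hR hR
      · rfl
      · exact absurd (hiff.mp hL) hR
      · exact absurd (hiff.mpr hR) hL
      · rfl

-- ===== VERDICT (by name: the statement is the Claim_ definition above) =====
theorem draw_grid_spec : Claim_equal_draw_grid := by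
  intro cols rows filled_cells total_cells _
  unfold Spec_draw_grid draw_grid draw_grid_alt
  simp only [PySem.List.foldl_append_singleton_eq_map, List.nil_append]
  congr 2
  apply List.map_congr_left
  intro r hr
  rw [PySem.List.mem_pyRange_one] at hr
  exact (row_eq cols rows _ r (le_max_left _ _) hr.1 hr.2).symm
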